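-- pv_equiv track=rewrite | github.com/jovanas00/VI | I faza/17872, 17980, 18013.py | proveraNijeKraj
-- ===== SOURCE A (Python) =====
-- def proveraNijeKraj(mat, iksOks: bool, m, n):
--     nijeKraj = False
--     if iksOks == False:
--         for a in range(m-1):
--             for b in range(n):
--                 if mat[a][b] == None and mat[a+1][b] == None:
--                     nijeKraj = True
--     else:
--         for a in range(m):
--             for b in range(n-1):
--                 if mat[a][b] == None and mat[a][b+1] == None:
--                     nijeKraj = True
--     return nijeKraj
-- ===== SOURCE B (Python) =====
-- def proveraNijeKraj(mat, iksOks: bool, m, n):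
--     empties = set()
--     for a in range(m):
--         for b in range(n):
--             if mat[a][b] is None:
--                 empties.add((a, b))
--     if not iksOks:
--         return any((a + 1, b) in empties for (a, b) in empties)
--     return any((a, b + 1) in empties for (a, b) in empties)
-- ===== Notes on version B (the rewrite author's own statement) =====
-- stated objective: alternative
-- what changed: B collects the coordinates of all empty cells into a set in one m-by-n grid scan and then decides adjacency purely by set-membership tests over that coordinate set, instead of A's nested loops that re-index the grid and update an accumulator flag.
-- outside the precondition, e.g. on proveraNijeKraj([[0]], False, 2, 1): A returns False, B raises IndexError; on proveraNijeKraj([[]], True, 1, 1): A returns False, B raises IndexError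
import Mathlib
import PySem

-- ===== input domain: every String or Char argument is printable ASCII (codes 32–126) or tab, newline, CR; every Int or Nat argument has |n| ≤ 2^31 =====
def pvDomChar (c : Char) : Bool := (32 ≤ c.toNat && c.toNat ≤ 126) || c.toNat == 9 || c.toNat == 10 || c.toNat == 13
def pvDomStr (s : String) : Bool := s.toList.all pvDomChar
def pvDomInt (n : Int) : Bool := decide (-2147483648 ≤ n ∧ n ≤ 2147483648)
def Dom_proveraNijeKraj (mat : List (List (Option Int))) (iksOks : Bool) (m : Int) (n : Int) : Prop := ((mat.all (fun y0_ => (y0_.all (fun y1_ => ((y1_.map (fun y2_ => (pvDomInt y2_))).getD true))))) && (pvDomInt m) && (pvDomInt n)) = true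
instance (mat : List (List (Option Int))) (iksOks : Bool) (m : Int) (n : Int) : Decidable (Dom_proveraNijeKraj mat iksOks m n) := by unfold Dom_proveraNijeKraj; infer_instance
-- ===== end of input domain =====

-- B replaces A's nested re-indexing loops with one grid scan collecting empty-cell
-- coordinates into a set, then a pure membership test for an adjacent empty cell
-- (objective: alternative; equivalence is about the RETURN value, neither mutates).

-- ===== PORT A =====
-- mat[a][b] for the 0 ≤ indices both ports use; default `some 0` (≠ none) stands for
-- an out-of-range access, which Pre_ excludes.
def pvCell (mat : List (List (Option Int))) (a b : Int) : Option Int :=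
  PySem.List.pyGetD (PySem.List.pyGetD mat a []) b (some 0)

def proveraNijeKraj (mat : List (List (Option Int))) (iksOks : Bool) (m : Int) (n : Int) : Bool :=
  if iksOks == false then
    (PySem.List.pyRange 0 (m-1) 1).foldl (fun nk a =>
      (PySem.List.pyRange 0 n 1).foldl (fun nk b =>
        if pvCell mat a b == none && pvCell mat (a+1) b == none then true else nk) nk) false
  else
    (PySem.List.pyRange 0 m 1).foldl (fun nk a =>
      (PySem.List.pyRange 0 (n-1) 1).foldl (fun nk b =>
        if pvCell mat a b == none && pvCell mat a (b+1) == none then true else nk) nk) false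

-- ===== PORT B =====
def pvEmpties (mat : List (List (Option Int))) (m n : Int) : PySem.Set (Int × Int) :=
  (PySem.List.pyRange 0 m 1).foldl (fun s a =>
    (PySem.List.pyRange 0 n 1).foldl (fun s b =>
      if pvCell mat a b == none then PySem.Set.add s (a, b) else s) s) PySem.Set.empty

def proveraNijeKraj_alt (mat : List (List (Option Int))) (iksOks : Bool) (m : Int) (n : Int) : Bool :=
  let empties := pvEmpties mat m n
  if !iksOks then
    empties.any (fun p => PySem.Set.contains empties (p.1 + 1, p.2))
  else
    empties.any (fun p => PySem.Set.contains empties (p.1, p.2 + 1))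

-- ===== PRECONDITION & SPEC =====
-- Pre_ excludes inputs where the m×n grid scan would hit an out-of-range index:
-- A raises IndexError on most of them, and on the rest (it returns only thanks to
-- its `and` short-circuit or an empty inner loop) B's full scan raises instead.
def Pre_proveraNijeKraj (mat : List (List (Option Int))) (iksOks : Bool) (m : Int) (n : Int) : Prop :=
  m ≤ 0 ∨ n ≤ 0 ∨ (m ≤ mat.length ∧ ∀ row ∈ mat.take m.toNat, n ≤ row.length)
instance (mat : List (List (Option Int))) (iksOks : Bool) (m : Int) (n : Int) : Decidable (Pre_proveraNijeKraj mat iksOks m n) := by unfold Pre_proveraNijeKraj; infer_instance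

def pvWitness_proveraNijeKraj : List (List (Option Int)) × Bool × Int × Int := ([[none], [none]], false, 2, 1)

def Spec_proveraNijeKraj (mat : List (List (Option Int))) (iksOks : Bool) (m : Int) (n : Int) (out : Bool) : Prop := out = proveraNijeKraj_alt mat iksOks m n
instance (mat : List (List (Option Int))) (iksOks : Bool) (m : Int) (n : Int) (out : Bool) : Decidable (Spec_proveraNijeKraj mat iksOks m n out) := by unfold Spec_proveraNijeKraj; infer_instance

-- ===== CLAIM (what is proved, stated in full; the proofs are below) =====
def Claim_equal_proveraNijeKraj : Prop := ∀ (mat : List (List (Option Int))) (iksOks : Bool) (m : Int) (n : Int), Dom_proveraNijeKraj mat iksOks m n → Pre_proveraNijeKraj mat iksOks m n → Spec_proveraNijeKraj mat iksOks m n (proveraNijeKraj mat iksOks m n)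

-- ===== LEMMAS AND PROOFS =====

-- A's accumulator loop is `any` over the list.
theorem pv_foldl_or {α : Type} (xs : List α) (q : α → Bool) :
    ∀ init : Bool, xs.foldl (fun acc x => acc || q x) init = (init || xs.any q) := by
  induction xs with
  | nil => intro init; simp
  | cons x xs ih => intro init; simp [List.foldl, ih, Bool.or_assoc]

theorem pv_step_eq {α : Type} (p : α → Bool) :
    (fun (acc : Bool) (x : α) => if p x then true else acc) = (fun acc x => acc || p x) := by
  funext acc x; cases h : p x <;> simp

theorem pv_nested_any {α β : Type} (as : List α) (bs : List β) (p : α → β → Bool) :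
    as.foldl (fun nk a => bs.foldl (fun nk b => if p a b then true else nk) nk) false =
      as.any (fun a => bs.any (p a)) := by
  have h : (fun (nk : Bool) (a : α) => bs.foldl (fun nk b => if p a b then true else nk) nk)
      = (fun nk a => nk || bs.any (p a)) := by
    funext nk a; rw [pv_step_eq, pv_foldl_or]
  rw [h, pv_foldl_or]; simp

theorem pv_A_any (mat : List (List (Option Int))) (iksOks : Bool) (m n : Int) :
    proveraNijeKraj mat iksOks m n =
      (if iksOks == false then
        (PySem.List.pyRange 0 (m-1) 1).any (fun a => (PySem.List.pyRange 0 n 1).any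
          (fun b => pvCell mat a b == none && pvCell mat (a+1) b == none))
      else
        (PySem.List.pyRange 0 m 1).any (fun a => (PySem.List.pyRange 0 (n-1) 1).any
          (fun b => pvCell mat a b == none && pvCell mat a (b+1) == none))) := by
  unfold proveraNijeKraj
  cases iksOks
  · simpa using pv_nested_any (PySem.List.pyRange 0 (m-1) 1) (PySem.List.pyRange 0 n 1)
      (fun a b => pvCell mat a b == none && pvCell mat (a+1) b == none)
  · simpa using pv_nested_any (PySem.List.pyRange 0 m 1) (PySem.List.pyRange 0 (n-1) 1)
      (fun a b => pvCell mat a b == none && pvCell mat a (b+1) == none)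

-- membership in the inner conditional-add fold over one row
theorem pv_mem_fold1 (mat : List (List (Option Int))) (a : Int) (bs : List Int) :
    ∀ (s : PySem.Set (Int × Int)) (y : Int × Int),
      (y ∈ bs.foldl (fun s b => if pvCell mat a b == none then PySem.Set.add s (a, b) else s) s) ↔
        y ∈ s ∨ ∃ b ∈ bs, pvCell mat a b = none ∧ y = (a, b) := by
  induction bs with
  | nil => intro s y; simp
  | cons b bs ih =>
    intro s y
    rw [List.foldl_cons, ih]
    split_ifs with h
    · simp only [PySem.Set.mem_add, List.mem_cons, beq_iff_eq] at h ⊢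
      aesop
    · simp only [List.mem_cons, beq_iff_eq] at h ⊢
      aesop

theorem pv_mem_empties (mat : List (List (Option Int))) (m n : Int) (y : Int × Int) :
    y ∈ pvEmpties mat m n ↔
      (0 ≤ y.1 ∧ y.1 < m) ∧ (0 ≤ y.2 ∧ y.2 < n) ∧ pvCell mat y.1 y.2 = none := by
  unfold pvEmpties
  have key : ∀ (as : List Int) (s : PySem.Set (Int × Int)),
      (y ∈ as.foldl (fun s a => (PySem.List.pyRange 0 n 1).foldl
        (fun s b => if pvCell mat a b == none then PySem.Set.add s (a, b) else s) s) s) ↔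
      y ∈ s ∨ ∃ a ∈ as, ∃ b ∈ PySem.List.pyRange 0 n 1, pvCell mat a b = none ∧ y = (a, b) := by
    intro as
    induction as with
    | nil => intro s; simp
    | cons a as ih =>
      intro s
      rw [List.foldl_cons, ih, pv_mem_fold1 mat a (PySem.List.pyRange 0 n 1)]
      simp only [beq_iff_eq, List.mem_cons]
      aesop
  rw [key]
  simp only [PySem.Set.empty, List.not_mem_nil, false_or, PySem.List.mem_pyRange_one]
  constructor
  · rintro ⟨a, ha, b, hb, hq, rfl⟩; exact ⟨ha, hb, hq⟩
  · rintro ⟨ha, hb, hq⟩; exact ⟨y.1, ha, y.2, hb, hq, rfl⟩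

theorem pv_B_iff (mat : List (List (Option Int))) (m n : Int) (g : Int × Int → Int × Int) :
    ((pvEmpties mat m n).any (fun p => PySem.Set.contains (pvEmpties mat m n) (g p)) = true) ↔
      ∃ p ∈ pvEmpties mat m n, g p ∈ pvEmpties mat m n := by
  simp [List.any_eq_true]

theorem pv_main (mat : List (List (Option Int))) (iksOks : Bool) (m n : Int) :
    proveraNijeKraj mat iksOks m n = proveraNijeKraj_alt mat iksOks m n := by
  rw [Bool.eq_iff_iff, pv_A_any]
  unfold proveraNijeKraj_alt
  cases iksOks
  · simp only [Bool.not_false, if_true, beq_self_eq_true]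
    rw [pv_B_iff mat m n (fun p => (p.1 + 1, p.2))]
    simp only [List.any_eq_true, PySem.List.mem_pyRange_one, pv_mem_empties, beq_iff_eq,
      Bool.and_eq_true]
    constructor
    · rintro ⟨a, ⟨ha0, ha1⟩, b, hb, h1, h2⟩
      exact ⟨(a, b), ⟨⟨ha0, by omega⟩, hb, h1⟩, ⟨by omega, by omega⟩, hb, h2⟩
    · rintro ⟨⟨a, b⟩, ⟨⟨ha0, ha1⟩, hb, h1⟩, ⟨_, ha2⟩, _, h2⟩
      exact ⟨a, ⟨ha0, by omega⟩, b, hb, h1, h2⟩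
  · simp only [Bool.not_true, if_false, beq_iff_eq, Bool.true_eq_false, reduceCtorEq]
    rw [pv_B_iff mat m n (fun p => (p.1, p.2 + 1))]
    simp only [List.any_eq_true, PySem.List.mem_pyRange_one, pv_mem_empties, beq_iff_eq,
      Bool.and_eq_true]
    constructor
    · rintro ⟨a, ha, b, ⟨hb0, hb1⟩, h1, h2⟩
      exact ⟨(a, b), ⟨ha, ⟨hb0, by omega⟩, h1⟩, ha, ⟨by omega, by omega⟩, h2⟩
    · rintro ⟨⟨a, b⟩, ⟨ha, ⟨hb0, hb1⟩, h1⟩, _, ⟨_, hb2⟩, h2⟩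
      exact ⟨a, ha, b, ⟨hb0, by omega⟩, h1, h2⟩

-- ===== VERDICT (by name: the statement is the Claim_ definition above) =====
theorem proveraNijeKraj_spec : Claim_equal_proveraNijeKraj := by
  intro mat iksOks m n _ _
  unfold Spec_proveraNijeKraj
  exact pv_main mat iksOks m n
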